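-- pv_equiv track=rewrite | github.com/PhilWieber/Datenintegration | 3_cleaning_showcase/IntecrationPythonCode/JSONManager/ListFluits.py | simplifySet
-- ===== SOURCE A (Python) =====
-- def simplifySet(input:set):
--     output = set()
--     for i in input:
--         temp = i
--         if "(" in temp:
--             temp = temp[:temp.find("(")]
--         if " - " in temp:
--             temp = temp[:temp.find(" - ")]
--         output.add(temp)
--     return output
-- ===== SOURCE B (Python) =====
-- def simplifySet(input: set):
--     # streaming scan: copy characters until the first position where either
--     # delimiter ("(" or " - ") begins, then stop; collect results as a set
--     def cut(s):
--         out = []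
--         j = 0
--         while j < len(s):
--             c = s[j]
--             if c == '(' or (c == ' ' and s[j+1:j+3] == '- '):
--                 break
--             out.append(c)
--             j += 1
--         return ''.join(out)
--     return {cut(i) for i in input}
-- ===== Notes on version B (the rewrite author's own statement) =====
-- stated objective: alternative
-- what changed: A truncates each element by two sequential find+slice passes ('(' then ' - ' re-searched in the truncated string); B never calls find or slices: it makes one left-to-right streaming scan per element, copying characters into an accumulator and stopping at the first position where either delimiter begins, and collects the results as a set comprehension.
import Mathlib
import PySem

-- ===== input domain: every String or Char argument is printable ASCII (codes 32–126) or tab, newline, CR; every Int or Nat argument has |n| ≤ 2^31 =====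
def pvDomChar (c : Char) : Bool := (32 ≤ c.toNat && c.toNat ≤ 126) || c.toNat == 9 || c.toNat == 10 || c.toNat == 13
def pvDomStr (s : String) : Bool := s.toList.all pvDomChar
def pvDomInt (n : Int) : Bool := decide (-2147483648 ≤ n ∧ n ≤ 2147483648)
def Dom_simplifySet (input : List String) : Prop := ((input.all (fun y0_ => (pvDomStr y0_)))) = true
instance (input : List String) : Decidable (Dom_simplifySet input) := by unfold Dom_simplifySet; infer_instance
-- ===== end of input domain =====

-- B replaces A's two sequential find+slice truncations of each element by a single streaming
-- left-to-right scan that copies characters until the first position where either delimiter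
-- begins (objective: alternative decomposition, same cost).

-- ===== PORT A =====
-- loop body of A: truncate at "(" if present, then at " - " if still present
def pvTrimA (i : String) : String :=
  let temp := i
  let temp := if PySem.Str.isIn "(" temp then PySem.Str.slice temp none (some (PySem.Str.find temp "(")) else temp
  let temp := if PySem.Str.isIn " - " temp then PySem.Str.slice temp none (some (PySem.Str.find temp " - ")) else temp
  temp

def simplifySet (input : List String) : List String :=
  input.foldl (fun output i => PySem.Set.add output (pvTrimA i)) PySem.Set.empty

-- ===== PORT B =====
-- B's while loop: j walks the string, out accumulates the copied characters; the
-- remaining suffix s[j:] is the recursion argument, so s[j] is its head and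
-- s[j+1:j+3] is 'slice rest none (some 2)'
def pvCutGo (out : List Char) : List Char → List Char
  | [] => out
  | c :: rest =>
    if c = '(' ∨ (c = ' ' ∧ PySem.List.slice rest none (some 2) = ['-', ' ']) then out
    else pvCutGo (out ++ [c]) rest

-- ''.join(out)
def pvCut (s : String) : String := String.ofList (pvCutGo [] s.toList)

def simplifySet_alt (input : List String) : List String :=
  PySem.Set.ofList (input.map pvCut)

-- ===== PRECONDITION & SPEC =====
def Spec_simplifySet (input : List String) (out : List String) : Prop := out = simplifySet_alt input
instance (input : List String) (out : List String) : Decidable (Spec_simplifySet input out) := by unfold Spec_simplifySet; infer_instance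

-- ===== CLAIM (what is proved, stated in full; the proofs are below) =====
def Claim_equal_simplifySet : Prop := ∀ (input : List String), Dom_simplifySet input → Spec_simplifySet input (simplifySet input)

-- ===== LEMMAS AND PROOFS =====

-- proof-side middle form: one slice at the minimum of the delimiter positions that are present
def pvTrimM (i : String) : String :=
  let cuts := [PySem.Str.find i "(", PySem.Str.find i " - "].filter (fun p => decide (p ≠ -1))
  match PySem.List.min? cuts (fun p => p) with
  | none => i
  | some m => PySem.Str.slice i none (some m)

theorem pv_find_eq {s sub : List Char} {k : Nat}
    (hocc : sub <+: s.drop k) (hmin : ∀ i, i < k → ¬ sub <+: s.drop i) :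
    PySem.Chars.find s sub = (k : Int) := by
  have hinf : sub <:+: s := hocc.isInfix.trans (List.drop_suffix k s).isInfix
  have hnn : 0 ≤ PySem.Chars.find s sub := (PySem.Chars.find_nonneg_iff s sub).mpr hinf
  obtain ⟨h1, h2⟩ := PySem.Chars.find_spec hnn
  rcases Nat.lt_trichotomy (PySem.Chars.find s sub).toNat k with h | h | h
  · exact absurd h1 (hmin _ h)
  · omega
  · exact absurd hocc (h2 k h)

theorem pv_prefix_drop_take {sub s : List Char} {i n : Nat} (hne : sub ≠ [])
    (h : sub <+: (s.take n).drop i) : sub <+: s.drop i ∧ i + sub.length ≤ n := by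
  rw [List.drop_take] at h
  have hlen := h.length_le
  simp [List.length_take] at hlen
  have hpre : sub <+: s.drop i := h.trans (List.take_prefix _ _)
  have : 0 < sub.length := List.length_pos_iff.mpr hne
  refine ⟨hpre, ?_⟩
  omega

theorem pv_take_prefix_drop {sub s : List Char} {i n : Nat}
    (h : sub <+: s.drop i) (hle : i + sub.length ≤ n) : sub <+: (s.take n).drop i := by
  rw [List.drop_take]
  exact (List.prefix_take_iff).mpr ⟨h, by omega⟩

theorem pv_not_infix_take {sub s : List Char} {n : Nat} (hne : sub ≠ [])
    (h : ∀ i, i + sub.length ≤ n → ¬ sub <+: s.drop i) : ¬ sub <:+: s.take n := by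
  intro hinf
  obtain ⟨j, hj⟩ := (PySem.Chars.exists_prefix_drop_iff_isIn sub (s.take n)).mpr
    ((PySem.Chars.isIn_iff_infix sub (s.take n)).mpr hinf)
  obtain ⟨hpre, hle⟩ := pv_prefix_drop_take hne hj
  exact h j hle hpre

-- A's two dependent truncations equal one slice at the minimum present delimiter position
theorem pv_trimA_eq_trimM (i : String) : pvTrimA i = pvTrimM i := by
  by_cases h1 : ['('] <:+: i.toList
  · by_cases h2 : [' ', '-', ' '] <:+: i.toList
    · -- both delimiters occur somewhere
      have e1 : PySem.Chars.find i.toList ['('] ≠ -1 := (PySem.Chars.find_ne_neg_one_iff _ _).mpr h1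
      have e2 : PySem.Chars.find i.toList [' ', '-', ' '] ≠ -1 := (PySem.Chars.find_ne_neg_one_iff _ _).mpr h2
      have b1 : PySem.Chars.isIn ['('] i.toList = true := (PySem.Chars.isIn_iff_infix _ _).mpr h1
      have nn1 : 0 ≤ PySem.Chars.find i.toList ['('] := (PySem.Chars.find_nonneg_iff _ _).mpr h1
      have nn2 : 0 ≤ PySem.Chars.find i.toList [' ', '-', ' '] := (PySem.Chars.find_nonneg_iff _ _).mpr h2
      simp [pvTrimA, pvTrimM, e1, e2, b1, PySem.List.min?_id_cons]
      rw [PySem.List.slice_to _ nn1]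
      obtain ⟨occ1, min1⟩ := PySem.Chars.find_spec nn1
      obtain ⟨occ2, min2⟩ := PySem.Chars.find_spec nn2
      obtain ⟨u, hu⟩ := occ1
      obtain ⟨t, ht⟩ := occ2
      set n1 := (PySem.Chars.find i.toList ['(']).toNat with hn1
      set n2 := (PySem.Chars.find i.toList [' ', '-', ' ']).toNat with hn2
      have hf1 : PySem.Chars.find i.toList ['('] = (n1 : Int) := (Int.toNat_of_nonneg nn1).symm
      have hf2 : PySem.Chars.find i.toList [' ', '-', ' '] = (n2 : Int) := (Int.toNat_of_nonneg nn2).symm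
      have hne : n1 ≠ n2 := by
        intro h
        rw [h, ← ht] at hu
        simp at hu
      rcases Nat.lt_trichotomy n2 n1 with hlt | heq | hgt
      · -- " - " occurs strictly before "(": both cut at n2
        have h3 : n2 + 3 ≤ n1 := by
          by_contra hc
          have hdrop : i.toList.drop n1 = List.drop (n1 - n2) (i.toList.drop n2) := by
            rw [List.drop_drop]; congr 1; omega
          rw [← hu, ← ht] at hdrop
          have h12 : n1 - n2 = 1 ∨ n1 - n2 = 2 := by omega
          rcases h12 with h12 | h12 <;> rw [h12] at hdrop <;> simp at hdrop
        have hocc : [' ', '-', ' '] <+: (i.toList.take n1).drop n2 :=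
          pv_take_prefix_drop ⟨t, ht⟩ (by simp; omega)
        have hmin : ∀ j, j < n2 → ¬ [' ', '-', ' '] <+: (i.toList.take n1).drop j := by
          intro j hj hp
          exact min2 j hj (pv_prefix_drop_take (by simp) hp).1
        have hfind : PySem.Chars.find (i.toList.take n1) [' ', '-', ' '] = (n2 : Int) :=
          pv_find_eq hocc hmin
        have hisin : PySem.Chars.isIn [' ', '-', ' '] (i.toList.take n1) = true :=
          (PySem.Chars.isIn_iff_infix _ _).mpr (hocc.isInfix.trans (List.drop_suffix _ _).isInfix)
        rw [hisin]
        simp only [if_true]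
        rw [hfind, hf1, hf2]
        have hmm : min ((n1 : Nat) : Int) ((n2 : Nat) : Int) = ((n2 : Nat) : Int) := by omega
        rw [hmm]
        simp [PySem.Str.slice, PySem.Chars.slice_eq_listSlice,
          PySem.List.slice_to _ (Int.natCast_nonneg _), List.take_take]
        rw [Nat.min_eq_left (by omega)]
      · exact absurd heq.symm hne
      · -- "(" occurs first: " - " does not survive in the prefix, both cut at n1
        have hnin : PySem.Chars.isIn [' ', '-', ' '] (i.toList.take n1) = false := by
          rw [PySem.Chars.isIn_eq_false_iff]
          exact pv_not_infix_take (by simp) (fun j hj hp => min2 j (by simp at hj; omega) hp)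
        rw [hnin]
        simp only [Bool.false_eq_true, if_false]
        rw [hf1, hf2]
        have hmm : min ((n1 : Nat) : Int) ((n2 : Nat) : Int) = ((n1 : Nat) : Int) := by omega
        rw [hmm]
    · -- only "(" occurs
      have e1 : PySem.Chars.find i.toList ['('] ≠ -1 := (PySem.Chars.find_ne_neg_one_iff _ _).mpr h1
      have e2 : PySem.Chars.find i.toList [' ', '-', ' '] = -1 := (PySem.Chars.find_eq_neg_one_iff _ _).mpr h2
      have b1 : PySem.Chars.isIn ['('] i.toList = true := (PySem.Chars.isIn_iff_infix _ _).mpr h1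
      have nn1 : 0 ≤ PySem.Chars.find i.toList ['('] := (PySem.Chars.find_nonneg_iff _ _).mpr h1
      simp [pvTrimA, pvTrimM, e1, e2, b1, PySem.List.min?_id_cons]
      rw [PySem.List.slice_to _ nn1]
      intro hx
      exact absurd ((PySem.Chars.isIn_iff_infix _ _).mp hx)
        (fun hinf => h2 (hinf.trans (List.take_prefix _ _).isInfix))
  · by_cases h2 : [' ', '-', ' '] <:+: i.toList
    · -- only " - " occurs
      have e1 : PySem.Chars.find i.toList ['('] = -1 := (PySem.Chars.find_eq_neg_one_iff _ _).mpr h1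
      have b1 : PySem.Chars.isIn ['('] i.toList = false := (PySem.Chars.isIn_eq_false_iff _ _).mpr h1
      have b2 : PySem.Chars.isIn [' ', '-', ' '] i.toList = true := (PySem.Chars.isIn_iff_infix _ _).mpr h2
      have e2 : PySem.Chars.find i.toList [' ', '-', ' '] ≠ -1 := (PySem.Chars.find_ne_neg_one_iff _ _).mpr h2
      simp [pvTrimA, pvTrimM, e1, e2, b1, b2, PySem.List.min?_id_cons]
    · -- neither occurs
      have e1 : PySem.Chars.find i.toList ['('] = -1 := (PySem.Chars.find_eq_neg_one_iff _ _).mpr h1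
      have e2 : PySem.Chars.find i.toList [' ', '-', ' '] = -1 := (PySem.Chars.find_eq_neg_one_iff _ _).mpr h2
      have b1 : PySem.Chars.isIn ['('] i.toList = false := (PySem.Chars.isIn_eq_false_iff _ _).mpr h1
      have b2 : PySem.Chars.isIn [' ', '-', ' '] i.toList = false := (PySem.Chars.isIn_eq_false_iff _ _).mpr h2
      simp [pvTrimA, pvTrimM, e1, e2, b1, b2]
      rfl

-- ==== linking B's streaming scan to the middle form ====

-- pure (non-accumulator) form of B's scan
def pvCutP : List Char → List Char
  | [] => []
  | c :: rest =>
    if c = '(' ∨ (c = ' ' ∧ PySem.List.slice rest none (some 2) = ['-', ' ']) then []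
    else c :: pvCutP rest

theorem pvCutGo_eq (s : List Char) : ∀ out, pvCutGo out s = out ++ pvCutP s := by
  induction s with
  | nil => intro out; simp [pvCutGo, pvCutP]
  | cons c rest ih =>
    intro out
    by_cases h : c = '(' ∨ (c = ' ' ∧ PySem.List.slice rest none (some 2) = ['-', ' '])
    · simp [pvCutGo, pvCutP, h]
    · simp [pvCutGo, pvCutP, h, ih]

-- D s j: one of the two delimiters begins at position j of s
def pvD (s : List Char) (j : Nat) : Prop :=
  ['('] <+: s.drop j ∨ [' ', '-', ' '] <+: s.drop j

theorem pv_cond_iff (c : Char) (rest : List Char) :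
    (c = '(' ∨ (c = ' ' ∧ PySem.List.slice rest none (some 2) = ['-', ' ']))
      ↔ pvD (c :: rest) 0 := by
  have hsl : PySem.List.slice rest none (some 2) = rest.take 2 := by
    have := PySem.List.slice_to_natCast (xs := rest) (b := 2)
    simpa using this
  constructor
  · rintro (h | ⟨h1, h2⟩)
    · left; simp [pvD, h]
    · right
      simp only [pvD, List.drop_zero]
      rw [hsl] at h2
      refine (List.cons_prefix_cons).mpr ⟨h1.symm, ?_⟩
      rw [List.prefix_iff_eq_take]
      simp [h2]
  · rintro (h | h)
    · left
      have h' : ['('] <+: c :: rest := by simpa [pvD] using h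
      exact ((List.cons_prefix_cons).mp h').1.symm
    · right
      have hp : [' ', '-', ' '] <+: c :: rest := by simpa [pvD] using h
      have h' := (List.cons_prefix_cons).mp hp
      refine ⟨h'.1.symm, ?_⟩
      rw [hsl]
      have := (List.prefix_iff_eq_take).mp h'.2
      simp at this
      exact this.symm
  
theorem pvCutP_of_none {s : List Char} (h : ∀ j, ¬ pvD s j) : pvCutP s = s := by
  induction s with
  | nil => simp [pvCutP]
  | cons c rest ih =>
    have h0 : ¬ pvD (c :: rest) 0 := h 0
    rw [pvCutP]
    rw [if_neg (fun hc => h0 ((pv_cond_iff c rest).mp hc))]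
    have : ∀ j, ¬ pvD rest j := by
      intro j hj
      exact h (j + 1) (by simpa [pvD] using hj)
    rw [ih this]

theorem pvCutP_of_cut {s : List Char} {k : Nat} (hk : pvD s k)
    (hmin : ∀ j, j < k → ¬ pvD s j) : pvCutP s = s.take k := by
  induction s generalizing k with
  | nil =>
    exfalso
    rcases hk with h | h <;> simp [List.prefix_iff_eq_take] at h
  | cons c rest ih =>
    by_cases h0 : pvD (c :: rest) 0
    · have hk0 : k = 0 := by
        by_contra hne
        exact hmin 0 (by omega) h0
      subst hk0
      rw [pvCutP, if_pos ((pv_cond_iff c rest).mpr h0)]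
      simp
    · have hkpos : k ≠ 0 := fun h => h0 (h ▸ hk)
      obtain ⟨k', rfl⟩ : ∃ k', k = k' + 1 := ⟨k - 1, by omega⟩
      rw [pvCutP, if_neg (fun hc => h0 ((pv_cond_iff c rest).mp hc))]
      have hk' : pvD rest k' := by simpa [pvD] using hk
      have hmin' : ∀ j, j < k' → ¬ pvD rest j := by
        intro j hj hjD
        exact hmin (j + 1) (by omega) (by simpa [pvD] using hjD)
      rw [ih hk' hmin']
      simp

theorem pv_str_slice_take (i : String) (n : Nat) :
    PySem.Str.slice i none (some (n : Int)) = String.ofList (i.toList.take n) := by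
  apply String.ext
  rw [PySem.Str.toList_slice, String.toList_ofList]
  simp [PySem.Chars.slice_eq_listSlice, PySem.List.slice_to _ (Int.natCast_nonneg n)]

theorem pv_trimM_eq_cut (i : String) : pvTrimM i = pvCut i := by
  have hgo : pvCut i = String.ofList (pvCutP i.toList) := by
    rw [pvCut, pvCutGo_eq]; simp
  by_cases h1 : ['('] <:+: i.toList
  · -- "(" occurs: a cut exists; let m be the minimum present find
    have e1 : PySem.Chars.find i.toList ['('] ≠ -1 := (PySem.Chars.find_ne_neg_one_iff _ _).mpr h1
    have nn1 : 0 ≤ PySem.Chars.find i.toList ['('] := (PySem.Chars.find_nonneg_iff _ _).mpr h1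
    obtain ⟨occ1, min1⟩ := PySem.Chars.find_spec nn1
    by_cases h2 : [' ', '-', ' '] <:+: i.toList
    · have e2 : PySem.Chars.find i.toList [' ', '-', ' '] ≠ -1 := (PySem.Chars.find_ne_neg_one_iff _ _).mpr h2
      have nn2 : 0 ≤ PySem.Chars.find i.toList [' ', '-', ' '] := (PySem.Chars.find_nonneg_iff _ _).mpr h2
      obtain ⟨occ2, min2⟩ := PySem.Chars.find_spec nn2
      set n1 := (PySem.Chars.find i.toList ['(']).toNat with hn1
      set n2 := (PySem.Chars.find i.toList [' ', '-', ' ']).toNat with hn2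
      have hf1 : PySem.Chars.find i.toList ['('] = (n1 : Int) := (Int.toNat_of_nonneg nn1).symm
      have hf2 : PySem.Chars.find i.toList [' ', '-', ' '] = (n2 : Int) := (Int.toNat_of_nonneg nn2).symm
      have hcut : pvCutP i.toList = i.toList.take (min n1 n2) := by
        apply pvCutP_of_cut
        · rcases Nat.le_total n1 n2 with h | h
          · left; rw [Nat.min_eq_left h]; exact occ1
          · right; rw [Nat.min_eq_right h]; exact occ2
        · intro j hj
          rintro (hD | hD)
          · exact min1 j (by omega) hD
          · exact min2 j (by omega) hD
      have hM : pvTrimM i = PySem.Str.slice i none (some (min ((n1 : Nat) : Int) ((n2 : Nat) : Int))) := by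
        simp [pvTrimM, e1, e2, PySem.List.min?_id_cons, hf1, hf2]
      rw [hgo, hcut, hM]
      apply String.ext
      rw [PySem.Str.toList_slice, String.toList_ofList, PySem.Chars.slice_eq_listSlice]
      rw [PySem.List.slice_to _ (by omega : (0:Int) ≤ min ((n1 : Nat) : Int) ((n2 : Nat) : Int))]
      have hT : (min ((n1 : Nat) : Int) ((n2 : Nat) : Int)).toNat = min n1 n2 := by omega
      rw [hT]
    · have e2 : PySem.Chars.find i.toList [' ', '-', ' '] = -1 := (PySem.Chars.find_eq_neg_one_iff _ _).mpr h2
      set n1 := (PySem.Chars.find i.toList ['(']).toNat with hn1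
      have hf1 : PySem.Chars.find i.toList ['('] = (n1 : Int) := (Int.toNat_of_nonneg nn1).symm
      have hcut : pvCutP i.toList = i.toList.take n1 := by
        apply pvCutP_of_cut
        · exact Or.inl occ1
        · intro j hj
          rintro (hD | hD)
          · exact min1 j hj hD
          · exact h2 (hD.isInfix.trans (List.drop_suffix _ _).isInfix)
      rw [hgo, hcut]
      simp [pvTrimM, e1, e2, PySem.List.min?_id_cons, hf1, pv_str_slice_take]
  · by_cases h2 : [' ', '-', ' '] <:+: i.toList
    · have e1 : PySem.Chars.find i.toList ['('] = -1 := (PySem.Chars.find_eq_neg_one_iff _ _).mpr h1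
      have e2 : PySem.Chars.find i.toList [' ', '-', ' '] ≠ -1 := (PySem.Chars.find_ne_neg_one_iff _ _).mpr h2
      have nn2 : 0 ≤ PySem.Chars.find i.toList [' ', '-', ' '] := (PySem.Chars.find_nonneg_iff _ _).mpr h2
      obtain ⟨occ2, min2⟩ := PySem.Chars.find_spec nn2
      set n2 := (PySem.Chars.find i.toList [' ', '-', ' ']).toNat with hn2
      have hf2 : PySem.Chars.find i.toList [' ', '-', ' '] = (n2 : Int) := (Int.toNat_of_nonneg nn2).symm
      have hcut : pvCutP i.toList = i.toList.take n2 := by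
        apply pvCutP_of_cut
        · exact Or.inr occ2
        · intro j hj
          rintro (hD | hD)
          · exact h1 (hD.isInfix.trans (List.drop_suffix _ _).isInfix)
          · exact min2 j hj hD
      rw [hgo, hcut]
      simp [pvTrimM, e1, e2, PySem.List.min?_id_cons, hf2, pv_str_slice_take]
    · have e1 : PySem.Chars.find i.toList ['('] = -1 := (PySem.Chars.find_eq_neg_one_iff _ _).mpr h1
      have e2 : PySem.Chars.find i.toList [' ', '-', ' '] = -1 := (PySem.Chars.find_eq_neg_one_iff _ _).mpr h2
      have hcut : pvCutP i.toList = i.toList := by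
        apply pvCutP_of_none
        intro j
        rintro (hD | hD)
        · exact h1 (hD.isInfix.trans (List.drop_suffix _ _).isInfix)
        · exact h2 (hD.isInfix.trans (List.drop_suffix _ _).isInfix)
      rw [hgo, hcut]
      simp [pvTrimM, e1, e2, PySem.List.min?]

theorem pv_trim_eq (i : String) : pvTrimA i = pvCut i :=
  (pv_trimA_eq_trimM i).trans (pv_trimM_eq_cut i)

-- ===== VERDICT (by name: the statement is the Claim_ definition above) =====
theorem simplifySet_spec : Claim_equal_simplifySet := by
  unfold Claim_equal_simplifySet Spec_simplifySet
  intro input _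
  unfold simplifySet simplifySet_alt
  rw [PySem.Set.ofList_eq_foldl, List.foldl_map]
  rw [funext pv_trim_eq]
  rfl
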